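-- pv_equiv track=rewrite | github.com/rohansiddeshwara-stride/address_extractor | build/lib/address_extractor/address.py | combine_bbox_along_y
-- ===== SOURCE A (Python) =====
-- def combine_bbox_along_y(bbox_list, distance_threshold=10):
--     combined_words = []
--
--     i = 0
--     while i < len(bbox_list):
--         curr_bbox = bbox_list[i]
--         combined_text = curr_bbox[4]
--         x1, y1, x2, y2 = curr_bbox[:4]
--
--         j = i + 1
--         while j < len(bbox_list):
--             next_bbox = bbox_list[j]
--             next_x1, next_y1, _, _ = next_bbox[:4]
--
--             if (abs(next_y1 - y2) <= distance_threshold  and abs(next_x1-x1)<=30):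
--                 combined_text += "\n" + next_bbox[4]
--                 x2 = next_bbox[2]
--                 j += 1
--             else:
--                 break
--
--         combined_words.append((x1, y1, x2, y2, combined_text))
--         i = j
--
--     return combined_words
-- ===== SOURCE B (Python) =====
-- def combine_bbox_along_y(bbox_list, distance_threshold=10):
--     # Two staged passes: first partition the boxes into runs (lists of boxes
--     # grouped under the run's first box as anchor), then derive each combined
--     # tuple from a whole run: x1/y1/y2 and text start from the first box, x2
--     # from the last box, text joined with newlines. Nothing is maintained
--     # incrementally per box.
--     groups = []
--     for box in bbox_list:
--         if groups and abs(box[1] - groups[-1][0][3]) <= distance_threshold \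
--                 and abs(box[0] - groups[-1][0][0]) <= 30:
--             groups[-1].append(box)
--         else:
--             groups.append([box])
--     return [(g[0][0], g[0][1], g[-1][2], g[0][3], "\n".join(b[4] for b in g))
--             for g in groups]
-- ===== Notes on version B (the rewrite author's own statement) =====
-- stated objective: alternative
-- what changed: Replaced A's nested index-walk that maintains running x2/text per box with two staged passes: first partition the boxes into runs (lists of boxes under the run's first box as anchor), then map each whole run to its tuple via first box, last box and a newline join.
import Mathlib
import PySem

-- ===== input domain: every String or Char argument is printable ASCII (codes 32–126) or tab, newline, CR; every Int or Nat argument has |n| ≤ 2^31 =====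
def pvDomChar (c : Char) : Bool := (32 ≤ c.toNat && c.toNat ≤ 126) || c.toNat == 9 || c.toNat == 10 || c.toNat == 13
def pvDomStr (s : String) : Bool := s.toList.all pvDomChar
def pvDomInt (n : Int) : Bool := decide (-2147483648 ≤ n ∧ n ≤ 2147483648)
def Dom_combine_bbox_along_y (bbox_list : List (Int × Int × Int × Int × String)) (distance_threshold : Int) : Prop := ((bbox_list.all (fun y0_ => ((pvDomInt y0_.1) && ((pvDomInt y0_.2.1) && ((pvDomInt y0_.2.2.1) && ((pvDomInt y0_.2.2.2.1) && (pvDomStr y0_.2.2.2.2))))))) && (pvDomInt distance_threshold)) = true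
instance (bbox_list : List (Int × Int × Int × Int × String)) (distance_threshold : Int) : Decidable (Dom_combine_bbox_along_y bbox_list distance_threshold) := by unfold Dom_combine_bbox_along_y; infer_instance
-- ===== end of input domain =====

-- B replaces A's nested index loops with two staged passes — partition the boxes into runs, then map each whole run to its tuple (alternative decomposition, same cost).

-- ===== PORT A =====
-- A's inner `while j < len(bbox_list)` loop: walks the suffix after position i,
-- updating x2 and the combined text while the adjacency condition holds;
-- returns (final x2, final text, remaining suffix = bbox_list[j:]).
def pvAInner (d : Int) : List (Int × Int × Int × Int × String) → Int → Int → Int → String →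
    (Int × String × List (Int × Int × Int × Int × String))
  | [], _, _, x2, t => (x2, t, [])
  | b :: rest, x1, y2, x2, t =>
    if |b.2.1 - y2| ≤ d ∧ |b.1 - x1| ≤ 30 then
      pvAInner d rest x1 y2 b.2.2.1 (t ++ "\n" ++ b.2.2.2.2)
    else (x2, t, b :: rest)

theorem pvAInner_len (d : Int) (l : List (Int × Int × Int × Int × String))
    (x1 y2 x2 : Int) (t : String) : (pvAInner d l x1 y2 x2 t).2.2.length ≤ l.length := by
  induction l generalizing x2 t with
  | nil => simp [pvAInner]
  | cons b rest ih =>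
    simp only [pvAInner]
    split
    · exact le_trans (ih _ _) (Nat.le_succ _)
    · simp

-- A's outer `while i < len(bbox_list)` loop: i points at the first box of the
-- next group (the suffix bbox_list[i:]); emits the combined tuple and jumps to j.
def pvAOuter (d : Int) : List (Int × Int × Int × Int × String) → List (Int × Int × Int × Int × String)
  | [] => []
  | b :: rest =>
    let r := pvAInner d rest b.1 b.2.2.2.1 b.2.2.1 b.2.2.2.2
    (b.1, b.2.1, r.1, b.2.2.2.1, r.2.1) :: pvAOuter d r.2.2
termination_by l => l.length
decreasing_by
  exact Nat.lt_succ_of_le (pvAInner_len d rest b.1 b.2.2.2.1 b.2.2.1 b.2.2.2.2)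

def combine_bbox_along_y (bbox_list : List (Int × Int × Int × Int × String)) (distance_threshold : Int) : List (Int × Int × Int × Int × String) :=
  pvAOuter distance_threshold bbox_list

-- ===== PORT B =====
-- B's stage-1 `for box in bbox_list` loop: state is `groups`, the list of runs
-- built so far; a box either extends the last run (its anchor = that run's
-- first box) or opens a new run.
def pvBGroupsGo (d : Int) : List (Int × Int × Int × Int × String) →
    List (List (Int × Int × Int × Int × String)) → List (List (Int × Int × Int × Int × String))
  | [], gs => gs
  | box :: rest, gs =>
    pvBGroupsGo d rest
      (match gs.getLast? with
       | some g =>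
         match g.head? with
         | some a =>
           if |box.2.1 - a.2.2.2.1| ≤ d ∧ |box.1 - a.1| ≤ 30 then
             gs.dropLast ++ [g ++ [box]]
           else gs ++ [[box]]
         | none => gs ++ [[box]]   -- unreachable: every run is created nonempty
       | none => gs ++ [[box]])

-- B's stage-2 comprehension body: a whole run `g` maps to its combined tuple
-- (g[0] fields, g[-1][2], "\n".join of the texts). g is never empty.
def pvBBuild (g : List (Int × Int × Int × Int × String)) : Int × Int × Int × Int × String :=
  match g with
  | [] => (0, 0, 0, 0, "")   -- unreachable (Python's g[0] would raise)
  | f :: _ => (f.1, f.2.1, (g.getLast?.getD f).2.2.1, f.2.2.2.1,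
               PySem.Str.join "\n" (g.map (·.2.2.2.2)))

def combine_bbox_along_y_alt (bbox_list : List (Int × Int × Int × Int × String)) (distance_threshold : Int) : List (Int × Int × Int × Int × String) :=
  (pvBGroupsGo distance_threshold bbox_list []).map pvBBuild

-- ===== PRECONDITION & SPEC =====
def Spec_combine_bbox_along_y (bbox_list : List (Int × Int × Int × Int × String)) (distance_threshold : Int) (out : List (Int × Int × Int × Int × String)) : Prop := out = combine_bbox_along_y_alt bbox_list distance_threshold
instance (bbox_list : List (Int × Int × Int × Int × String)) (distance_threshold : Int) (out : List (Int × Int × Int × Int × String)) : Decidable (Spec_combine_bbox_along_y bbox_list distance_threshold out) := by unfold Spec_combine_bbox_along_y; infer_instance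

-- ===== CLAIM (what is proved, stated in full; the proofs are below) =====
def Claim_equal_combine_bbox_along_y : Prop := ∀ (bbox_list : List (Int × Int × Int × Int × String)) (distance_threshold : Int), Dom_combine_bbox_along_y bbox_list distance_threshold → Spec_combine_bbox_along_y bbox_list distance_threshold (combine_bbox_along_y bbox_list distance_threshold)

-- ===== LEMMAS AND PROOFS =====

-- Proof-only intermediate: the "open group" accumulator run. Both programs reduce to it.
def pvGo (d : Int) : List (Int × Int × Int × Int × String) → (Int × Int × Int × Int × String) →
    List (Int × Int × Int × Int × String)
  | [], g => [g]
  | b :: rest, g =>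
    if |b.2.1 - g.2.2.2.1| ≤ d ∧ |b.1 - g.1| ≤ 30 then
      pvGo d rest (g.1, g.2.1, b.2.2.1, g.2.2.2.1, g.2.2.2.2 ++ "\n" ++ b.2.2.2.2)
    else g :: pvGo d rest b

-- A-side: the open-group run equals A's inner loop followed by A's outer loop on what remains.
theorem pvGo_eq_inner (d : Int) (l : List (Int × Int × Int × Int × String))
    (x1 y1 x2 y2 : Int) (t : String) :
    pvGo d l (x1, y1, x2, y2, t) =
      (x1, y1, (pvAInner d l x1 y2 x2 t).1, y2, (pvAInner d l x1 y2 x2 t).2.1) ::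
        pvAOuter d (pvAInner d l x1 y2 x2 t).2.2 := by
  induction l generalizing x1 y1 x2 y2 t with
  | nil => simp [pvGo, pvAInner, pvAOuter]
  | cons b rest ih =>
    obtain ⟨bx1, by1, bx2, by2, bt⟩ := b
    simp only [pvGo, pvAInner]
    split
    · exact ih _ _ _ _ _
    · rw [pvAOuter, ih]

theorem A_eq_pvGo (d : Int) (b : Int × Int × Int × Int × String)
    (rest : List (Int × Int × Int × Int × String)) :
    pvAOuter d (b :: rest) = pvGo d rest b := by
  obtain ⟨bx1, by1, bx2, by2, bt⟩ := b
  rw [pvAOuter, pvGo_eq_inner]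

-- B-side: stage 1 only ever inspects and modifies the LAST run, so finished runs split off.
theorem pvBGroupsGo_append (d : Int) (l : List (Int × Int × Int × Int × String))
    (gs : List (List (Int × Int × Int × Int × String))) (g : List (Int × Int × Int × Int × String)) :
    pvBGroupsGo d l (gs ++ [g]) = gs ++ pvBGroupsGo d l [g] := by
  induction l generalizing gs g with
  | nil => simp [pvBGroupsGo]
  | cons box rest ih =>
    have h1 : ([g] : List (List (Int × Int × Int × Int × String))).getLast? = some g := rfl
    have h2 : ([g] : List (List (Int × Int × Int × Int × String))).dropLast = [] := rfl
    simp only [pvBGroupsGo, List.getLast?_concat, List.dropLast_concat, h1, h2]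
    cases hh : g.head? with
    | none =>
      rw [ih (gs ++ [g]) [box], ih [g] [box]]
      simp
    | some a =>
      dsimp only
      split_ifs with hc
      · rw [List.nil_append]
        exact ih gs (g ++ [box])
      · rw [ih (gs ++ [g]) [box], ih [g] [box]]
        simp

-- "\n".join over a run extended on the right, for a nonempty run.
theorem chars_join_concat (sep : List Char) (xs : List (List Char)) (y : List Char) (hx : xs ≠ []) :
    PySem.Chars.join sep (xs ++ [y]) = PySem.Chars.join sep xs ++ sep ++ y := by
  induction xs with
  | nil => exact absurd rfl hx
  | cons a as ih =>
    cases as with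
    | nil => simp [List.cons_append, PySem.Chars.join_cons_cons, PySem.Chars.join_singleton]
    | cons b bs =>
      have ih' := ih (by simp)
      simp only [List.cons_append] at ih' ⊢
      rw [PySem.Chars.join_cons_cons, ih', PySem.Chars.join_cons_cons]
      simp [List.append_assoc]

theorem str_join_concat (xs : List String) (y : String) (hx : xs ≠ []) :
    PySem.Str.join "\n" (xs ++ [y]) = PySem.Str.join "\n" xs ++ "\n" ++ y := by
  rw [← String.toList_inj]
  simp only [PySem.Str.toList_join, List.map_append, List.map_cons, List.map_nil,
    String.toList_append]
  rw [chars_join_concat _ _ _ (by simpa using hx)]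

theorem str_join_singleton (y : String) : PySem.Str.join "\n" [y] = y := by
  rw [← String.toList_inj]
  simp [PySem.Str.toList_join, PySem.Chars.join_singleton]

theorem pvBBuild_singleton (b : Int × Int × Int × Int × String) : pvBBuild [b] = b := by
  obtain ⟨a1, a2, a3, a4, a5⟩ := b
  simp [pvBBuild, str_join_singleton]

-- Key bridge: mapping pvBBuild over stage 1 started from one open run equals the
-- accumulator run started from that run's combined tuple.
theorem map_build_pvBGroupsGo (d : Int) (l : List (Int × Int × Int × Int × String))
    (g : List (Int × Int × Int × Int × String)) (hg : g ≠ []) :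
    (pvBGroupsGo d l [g]).map pvBBuild = pvGo d l (pvBBuild g) := by
  induction l generalizing g with
  | nil => simp [pvBGroupsGo, pvGo]
  | cons box rest ih =>
    obtain ⟨f, gtl, rfl⟩ := List.exists_cons_of_ne_nil hg
    have h1 : ([f :: gtl] : List (List (Int × Int × Int × Int × String))).getLast? = some (f :: gtl) := rfl
    have h2 : ([f :: gtl] : List (List (Int × Int × Int × Int × String))).dropLast = [] := rfl
    simp only [pvBGroupsGo, h1, h2, List.head?_cons, List.nil_append]
    have hb : pvBBuild (f :: gtl) = (f.1, f.2.1, ((f :: gtl).getLast?.getD f).2.2.1, f.2.2.2.1,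
        PySem.Str.join "\n" ((f :: gtl).map (·.2.2.2.2))) := rfl
    by_cases hc : |box.2.1 - f.2.2.2.1| ≤ d ∧ |box.1 - f.1| ≤ 30
    · rw [if_pos hc, ih ((f :: gtl) ++ [box]) (by simp)]
      have he : pvBBuild ((f :: gtl) ++ [box]) =
          (f.1, f.2.1, box.2.2.1, f.2.2.2.1,
            PySem.Str.join "\n" ((f :: gtl).map (·.2.2.2.2)) ++ "\n" ++ box.2.2.2.2) := by
        have hrep : (f :: gtl) ++ [box] = f :: (gtl ++ [box]) := by simp
        rw [hrep]
        show (f.1, f.2.1, ((f :: (gtl ++ [box])).getLast?.getD f).2.2.1, f.2.2.2.1,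
            PySem.Str.join "\n" ((f :: (gtl ++ [box])).map (·.2.2.2.2))) = _
        rw [← hrep, List.getLast?_concat, List.map_append]
        simp only [List.map_cons, List.map_nil, Option.getD_some]
        rw [str_join_concat _ _ (by simp)]
      rw [he, pvGo, hb, if_pos (by simpa using hc)]
    · rw [if_neg hc, pvBGroupsGo_append d rest [f :: gtl] [box],
        List.map_append, List.map_cons, List.map_nil, List.singleton_append,
        ih [box] (by simp), pvBBuild_singleton, pvGo, hb, if_neg (by simpa using hc)]

-- ===== VERDICT (by name: the statement is the Claim_ definition above) =====
theorem combine_bbox_along_y_spec : Claim_equal_combine_bbox_along_y := by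
  intro l d _
  unfold Spec_combine_bbox_along_y combine_bbox_along_y combine_bbox_along_y_alt
  cases l with
  | nil => simp [pvAOuter, pvBGroupsGo]
  | cons b rest =>
    have h0 : pvBGroupsGo d (b :: rest) [] = pvBGroupsGo d rest [[b]] := by
      simp [pvBGroupsGo]
    rw [A_eq_pvGo, h0, map_build_pvBGroupsGo d rest [b] (by simp), pvBBuild_singleton]
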